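-- pv_equiv track=rewrite | github.com/alexandraback/datacollection | solutions_5630113748090880_1/Python/Ljq/b.py | Run
-- ===== SOURCE A (Python) =====
-- def Run(n, inp):
-- 	ns = {}
-- 	for vv in inp:
-- 		for v in vv:
-- 			ns[v] = ns.get(v, 0) + 1
-- 	rs = [x for x,y in ns.items() if y % 2 == 1]
-- 	rs.sort()
-- 	return ' '.join(map(str, rs))
-- ===== SOURCE B (Python) =====
-- def Run(n, inp):
--     xs = sorted(x for vv in inp for x in vv)
--     parts = []
--     prev = None
--     k = 0
--     for x in xs:
--         if x == prev:
--             k += 1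
--         else:
--             if k % 2 == 1:
--                 parts.append(str(prev))
--             prev = x
--             k = 1
--     if k % 2 == 1:
--         parts.append(str(prev))
--     return ' '.join(parts)
-- ===== Notes on version B (the rewrite author's own statement) =====
-- stated objective: alternative
-- what changed: Instead of counting occurrences in a dictionary and filtering odd counts, B flattens and sorts the whole multiset first and then makes one linear run-length scan over the sorted list, emitting each element whose run length is odd; no dictionary, counter or set is ever built.
import Mathlib
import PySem

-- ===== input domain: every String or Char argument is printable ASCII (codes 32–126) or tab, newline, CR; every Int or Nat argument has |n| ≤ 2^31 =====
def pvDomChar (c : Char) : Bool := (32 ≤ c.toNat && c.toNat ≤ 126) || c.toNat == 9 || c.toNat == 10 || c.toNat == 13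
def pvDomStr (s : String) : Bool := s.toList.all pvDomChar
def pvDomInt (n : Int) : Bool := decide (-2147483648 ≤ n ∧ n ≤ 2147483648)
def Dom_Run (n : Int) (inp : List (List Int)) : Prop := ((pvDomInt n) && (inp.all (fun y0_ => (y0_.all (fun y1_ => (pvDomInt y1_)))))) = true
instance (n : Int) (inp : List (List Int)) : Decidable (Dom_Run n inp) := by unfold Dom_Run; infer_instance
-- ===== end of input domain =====

-- B replaces A's dictionary of counts by sorting the flattened multiset and one run-length scan (alternative algorithm); return values proved equal.

-- ===== PORT A =====
def Run (n : Int) (inp : List (List Int)) : String :=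
  -- ns = {}; nested loops: ns[v] = ns.get(v, 0) + 1
  let ns : PySem.Dict Int Int :=
    inp.foldl (fun ns vv => vv.foldl (fun ns v => ns.modify v 0 (fun x => x + 1)) ns) PySem.Dict.empty
  -- rs = [x for x,y in ns.items() if y % 2 == 1]
  let rs : List Int := (ns.items.filter (fun xy => PySem.Int.mod xy.2 2 == 1)).map Prod.fst
  -- rs.sort()
  let rs' := PySem.List.sorted rs (fun x => x) false
  -- ' '.join(map(str, rs))
  PySem.Str.join " " (rs'.map PySem.Int.toStr)

-- ===== PORT B =====
-- str(prev) for prev : Option Int (the branch with prev = None is never taken, k = 0 there)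
def pvStrOpt : Option Int → String
  | none => "None"
  | some p => PySem.Int.toStr p

-- the body of B's for-loop over the sorted list: state (parts, prev, k)
def pvStep (st : List String × Option Int × Nat) (x : Int) : List String × Option Int × Nat :=
  let (parts, prev, k) := st
  if some x == prev then (parts, prev, k + 1)
  else ((if k % 2 == 1 then parts ++ [pvStrOpt prev] else parts), some x, 1)

def Run_alt (n : Int) (inp : List (List Int)) : String :=
  -- xs = sorted(x for vv in inp for x in vv)
  let xs := PySem.List.sorted inp.flatten (fun x => x) false
  -- parts = []; prev = None; k = 0; for x in xs: …
  let st := xs.foldl pvStep ([], none, 0)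
  -- final flush: if k % 2 == 1: parts.append(str(prev))
  let parts := if st.2.2 % 2 == 1 then st.1 ++ [pvStrOpt st.2.1] else st.1
  PySem.Str.join " " parts

-- ===== PRECONDITION & SPEC =====
def Spec_Run (n : Int) (inp : List (List Int)) (out : String) : Prop := out = Run_alt n inp
instance (n : Int) (inp : List (List Int)) (out : String) : Decidable (Spec_Run n inp out) := by unfold Spec_Run; infer_instance

-- ===== CLAIM (what is proved, stated in full; the proofs are below) =====
def Claim_equal_Run : Prop := ∀ (n : Int) (inp : List (List Int)), Dom_Run n inp → Spec_Run n inp (Run n inp)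

-- ===== LEMMAS AND PROOFS =====

-- a nested fold over a list of lists is the fold over the flattened list
theorem pv_foldl_nested {α β : Type} (f : β → α → β) (inp : List (List α)) (init : β) :
    inp.foldl (fun b vv => vv.foldl f b) init = inp.flatten.foldl f init := by
  induction inp generalizing init with
  | nil => rfl
  | cons vv t ih => simp [List.foldl_append, ih]

-- the group-heads with odd multiplicity, peeled group by group
def pvOdds : List Int → List Int
  | [] => []
  | y :: t =>
    (if (1 + t.count y) % 2 == 1 then [y] else []) ++ pvOdds (t.filter (fun z => z != y))
termination_by ys => ys.length
decreasing_by
  simp only [List.length_unattach, List.length_cons]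
  exact Nat.lt_succ_of_le (le_trans (List.length_filter_le _ _) (by simp))

theorem pv_mem_pvOdds (ys : List Int) (a : Int) :
    a ∈ pvOdds ys ↔ ys.count a % 2 = 1 := by
  induction ys using pvOdds.induct with
  | case1 => simp [pvOdds]
  | case2 y t ih =>
    simp at ih
    rw [pvOdds]
    simp only [List.mem_append, ih]
    by_cases hay : a = y
    · subst hay
      have h0 : (t.filter (fun z => z != a)).count a = 0 := by
        simp [List.count_eq_zero, List.mem_filter]
      rw [h0]
      have hc : (a :: t).count a = t.count a + 1 := List.count_cons_self ..
      rw [hc]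
      by_cases hodd : (1 + t.count a) % 2 = 1
      · simp [hodd]; omega
      · have hodd' : ¬ ((1 + t.count a) % 2 == 1) = true := by simpa using hodd
        simp [hodd']; omega
    · have hcnt : (y :: t).count a = t.count a := by
        simp [Ne.symm hay]
      have hfil : (t.filter (fun z => z != y)).count a = t.count a := by
        rw [List.count_filter]; simp [hay]
      rw [hcnt, hfil]
      have hno : (a ∈ if ((1 + List.count y t) % 2 == 1) = true then [y] else []) ↔ False := by
        split <;> simp [hay]
      rw [hno]
      tauto

theorem pv_pvOdds_subset (ys : List Int) (a : Int) (h : a ∈ pvOdds ys) : a ∈ ys := by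
  rw [pv_mem_pvOdds] at h
  have : 0 < ys.count a := by omega
  exact List.count_pos_iff.mp this

theorem pv_pvOdds_pairwise (ys : List Int) (hs : ys.Pairwise (· ≤ ·)) :
    (pvOdds ys).Pairwise (· < ·) := by
  induction ys using pvOdds.induct with
  | case1 => simp [pvOdds]
  | case2 y t ih =>
    simp at ih
    rw [pvOdds]
    have hle : ∀ z ∈ t, y ≤ z := (List.pairwise_cons.mp hs).1
    have hst : t.Pairwise (· ≤ ·) := (List.pairwise_cons.mp hs).2
    refine List.pairwise_append.mpr ⟨?_, ?_, ?_⟩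
    · split <;> simp
    · exact ih (hst.filter _)
    · intro a ha b hb
      have ha' : a = y := by split at ha <;> simp_all
      subst ha'
      have hbmem := pv_pvOdds_subset _ _ hb
      rw [List.mem_filter] at hbmem
      have hne : b ≠ a := by simpa using hbmem.2
      exact lt_of_le_of_ne (hle b hbmem.1) (Ne.symm hne)

-- the scan over a tail of the sorted list, started inside a run of a
theorem pv_scan_aux (ys : List Int) (hs : ys.Pairwise (· ≤ ·)) :
    ∀ (a : Int), (∀ z ∈ ys, a ≤ z) → ∀ (parts : List String) (k : Nat),
    (let st := ys.foldl pvStep (parts, some a, k)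
     if st.2.2 % 2 == 1 then st.1 ++ [pvStrOpt st.2.1] else st.1)
    = parts ++ (if (k + ys.count a) % 2 == 1 then [PySem.Int.toStr a] else [])
        ++ (pvOdds (ys.filter (fun z => z != a))).map PySem.Int.toStr := by
  induction ys with
  | nil =>
    intro a _ parts k
    by_cases hk : k % 2 = 1 <;> simp [pvOdds, pvStrOpt, hk]
  | cons y t ih =>
    intro a hle parts k
    have hst : t.Pairwise (· ≤ ·) := (List.pairwise_cons.mp hs).2
    have hyt : ∀ z ∈ t, y ≤ z := (List.pairwise_cons.mp hs).1
    by_cases hya : y = a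
    · subst hya
      have hstep : pvStep (parts, some y, k) y = (parts, some y, k + 1) := by
        simp [pvStep]
      simp only [List.foldl_cons, hstep]
      have hrec := ih hst y hyt parts (k + 1)
      rw [hrec]
      have hcnt : (y :: t).count y = 1 + t.count y := by
        rw [List.count_cons_self]; omega
      have hfil : (y :: t).filter (fun z => z != y) = t.filter (fun z => z != y) := by
        simp
      rw [hcnt, hfil]
      have hk1 : k + 1 + t.count y = k + (1 + t.count y) := by omega
      rw [hk1]
    · have hay : a < y := lt_of_le_of_ne (hle y List.mem_cons_self) (fun h => hya h.symm)
      have hstep : pvStep (parts, some a, k) y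
          = ((if k % 2 == 1 then parts ++ [pvStrOpt (some a)] else parts), some y, 1) := by
        simp [pvStep, hya]
      simp only [List.foldl_cons, hstep]
      have hrec := ih hst y hyt (if k % 2 == 1 then parts ++ [pvStrOpt (some a)] else parts) 1
      rw [hrec]
      have hanot : a ∉ t := fun hmem => absurd (hyt a hmem) (not_le.mpr hay)
      have hcnt : (y :: t).count a = 0 := by
        rw [List.count_eq_zero]
        intro hmem
        rcases List.mem_cons.mp hmem with h | h
        · exact hya h.symm
        · exact hanot h
      rw [hcnt]
      have hfil : (y :: t).filter (fun z => z != a) = y :: t := by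
        apply List.filter_eq_self.mpr
        intro z hz
        rcases List.mem_cons.mp hz with h | h
        · subst h; simp [hya]
        · simp; exact fun he => hanot (he ▸ h)
      rw [hfil, pvOdds]
      by_cases hk : k % 2 = 1 <;> by_cases h2 : (1 + t.count y) % 2 = 1 <;>
        simp [hk, h2, pvStrOpt]

-- the parity test A runs on a stored count
theorem pv_mod2 (c : Nat) :
    (PySem.Int.mod (c : Int) 2 == 1) = (c % 2 == 1) := by
  have h : PySem.Int.mod (c : Int) 2 = ((c % 2 : Nat) : Int) := by
    simp [PySem.Int.mod, Int.fmod_eq_emod]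
  rw [h]
  rcases Nat.mod_two_eq_zero_or_one c with h2 | h2 <;> simp [h2]

-- A's odd-count key list, characterised as a filter of the ordered dedup of the flattened input
theorem pv_A_rs (xs : List Int) :
    (((PySem.Dict.counter xs).items.filter (fun xy : Int × Int => PySem.Int.mod xy.2 2 == 1)).map Prod.fst)
    = (PySem.Set.ofList xs).filter (fun k => List.count k xs % 2 == 1) := by
  rw [PySem.Dict.items_counter, List.filter_map, List.map_map]
  have hf : (Prod.fst ∘ fun k : Int => (k, (List.count k xs : Int))) = id := rfl
  rw [hf, List.map_id]
  congr 1
  funext k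
  simp only [Function.comp]
  exact pv_mod2 (List.count k xs)

-- A's sorted result list equals the group-heads list of the sorted flatten
theorem pv_lists_eq (xs : List Int) :
    PySem.List.sorted ((PySem.Set.ofList xs).filter (fun k => List.count k xs % 2 == 1)) (fun x => x) false
    = pvOdds (PySem.List.sorted xs (fun x => x) false) := by
  have hperm : (PySem.List.sorted xs (fun x => x) false).Perm xs := PySem.List.sorted_perm _ _ _
  have hpw : (pvOdds (PySem.List.sorted xs (fun x => x) false)).Pairwise (· < ·) :=
    pv_pvOdds_pairwise _ (PySem.List.sorted_pairwise _ _)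
  apply PySem.List.sorted_eq_of_perm_of_pairwise_lt
  · have hnodA : ((PySem.Set.ofList xs).filter (fun k => List.count k xs % 2 == 1)).Nodup :=
      (PySem.Set.nodup_ofList xs).filter _
    have hnodB : (pvOdds (PySem.List.sorted xs (fun x => x) false)).Nodup :=
      hpw.imp (fun h => ne_of_lt h)
    rw [List.perm_ext_iff_of_nodup hnodB hnodA]
    intro a
    rw [pv_mem_pvOdds, hperm.count_eq]
    simp only [List.mem_filter, PySem.Set.mem_ofList]
    constructor
    · intro h
      exact ⟨List.count_pos_iff.mp (by omega), by simp [h]⟩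
    · intro ⟨_, h⟩
      simpa using h
  · exact hpw

-- ===== VERDICT (by name: the statement is the Claim_ definition above) =====
theorem Run_spec : Claim_equal_Run := by
  intro n inp _
  unfold Spec_Run Run Run_alt
  simp only
  rw [pv_foldl_nested, ← PySem.Dict.counter_eq_foldl, pv_A_rs, pv_lists_eq]
  congr 1
  have hp : (PySem.List.sorted inp.flatten (fun x => x) false).Pairwise (· ≤ ·) :=
    PySem.List.sorted_pairwise _ _
  generalize hys : PySem.List.sorted inp.flatten (fun x => x) false = ys at hp ⊢
  cases ys with
  | nil => simp [pvOdds]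
  | cons y t =>
    have hstep : pvStep ([], none, 0) y = ([], some y, 1) := by simp [pvStep]
    simp only [List.foldl_cons, hstep]
    have hrec := pv_scan_aux t (List.pairwise_cons.mp hp).2 y (List.pairwise_cons.mp hp).1 [] 1
    simp only at hrec
    rw [hrec, pvOdds]
    by_cases h2 : (1 + t.count y) % 2 = 1 <;> simp [h2]
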